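-- pv_equiv track=rewrite | github.com/Giulio-Ricci/BondTradingSystem | curve_strategies/build_regime_charts.py | _order_strategies
-- ===== SOURCE A (Python) =====
-- STRATEGY_GROUPS = {
--     "Steepeners": {
--         "prefix": "steep_",
--         "palette": ["#1565c0", "#1976d2", "#1e88e5", "#2196f3",
--                      "#42a5f5", "#64b5f6", "#90caf9", "#bbdefb"],
--     },
--     "Flatteners": {
--         "prefix": "flat_",
--         "palette": ["#e65100", "#f57c00", "#ff9800", "#ffb74d"],
--     },
--     "Butterflies": {
--         "prefix": "bfly_",
--         "palette": ["#1b5e20", "#2e7d32", "#388e3c",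
--                      "#43a047", "#66bb6a", "#81c784"],
--     },
--     "Directional": {
--         "prefix": "bh_",
--         "palette": ["#b71c1c", "#c62828", "#d32f2f", "#e53935"],
--     },
--     "Barbell": {
--         "prefix": "barbell_",
--         "palette": ["#6a1b9a", "#7b1fa2", "#8e24aa"],
--     },
-- }
--
-- def _order_strategies(strat_names):
--     """Return (ordered_strats, group_labels) sorted by strategy group."""
--     group_order = ["Steepeners", "Flatteners", "Butterflies",
--                    "Directional", "Barbell"]
--     ordered = []
--     labels = []
--     for grp in group_order:
--         prefix = STRATEGY_GROUPS[grp]["prefix"]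
--         members = [s for s in strat_names if s.startswith(prefix)]
--         ordered.extend(members)
--         labels.extend([grp] * len(members))
--     for s in strat_names:
--         if s not in ordered:
--             ordered.append(s)
--             labels.append("Other")
--     return ordered, labels
-- ===== SOURCE B (Python) =====
-- STRATEGY_GROUPS = {
--     "Steepeners": {
--         "prefix": "steep_",
--         "palette": ["#1565c0", "#1976d2", "#1e88e5", "#2196f3",
--                      "#42a5f5", "#64b5f6", "#90caf9", "#bbdefb"],
--     },
--     "Flatteners": {
--         "prefix": "flat_",
--         "palette": ["#e65100", "#f57c00", "#ff9800", "#ffb74d"],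
--     },
--     "Butterflies": {
--         "prefix": "bfly_",
--         "palette": ["#1b5e20", "#2e7d32", "#388e3c",
--                      "#43a047", "#66bb6a", "#81c784"],
--     },
--     "Directional": {
--         "prefix": "bh_",
--         "palette": ["#b71c1c", "#c62828", "#d32f2f", "#e53935"],
--     },
--     "Barbell": {
--         "prefix": "barbell_",
--         "palette": ["#6a1b9a", "#7b1fa2", "#8e24aa"],
--     },
-- }
--
-- _GROUP_ORDER = ["Steepeners", "Flatteners", "Butterflies",
--                 "Directional", "Barbell"]
--
--
-- def _order_strategies(strat_names):
--     """Return (ordered_strats, group_labels) sorted by strategy group."""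
--     buckets = {g: [] for g in _GROUP_ORDER}
--     other = []
--     seen = set()
--     for s in strat_names:
--         for g in _GROUP_ORDER:
--             if s.startswith(STRATEGY_GROUPS[g]["prefix"]):
--                 buckets[g].append(s)
--                 break
--         else:
--             if s not in seen:
--                 seen.add(s)
--                 other.append(s)
--     ordered = []
--     labels = []
--     for g in _GROUP_ORDER:
--         ordered += buckets[g]
--         labels += [g] * len(buckets[g])
--     ordered += other
--     labels += ["Other"] * len(other)
--     return ordered, labels
-- ===== Notes on version B (the rewrite author's own statement) =====
-- stated objective: faster
-- what changed: Replaces A's five full rescans of strat_names (one filter per group) plus a second loop testing 's not in ordered' against the growing result list by a single classifying pass that appends each name to its group's bucket (first matching prefix) or, if unseen, to an Other bucket guarded by a seen set, then concatenates the buckets in group order.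
import Mathlib
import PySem

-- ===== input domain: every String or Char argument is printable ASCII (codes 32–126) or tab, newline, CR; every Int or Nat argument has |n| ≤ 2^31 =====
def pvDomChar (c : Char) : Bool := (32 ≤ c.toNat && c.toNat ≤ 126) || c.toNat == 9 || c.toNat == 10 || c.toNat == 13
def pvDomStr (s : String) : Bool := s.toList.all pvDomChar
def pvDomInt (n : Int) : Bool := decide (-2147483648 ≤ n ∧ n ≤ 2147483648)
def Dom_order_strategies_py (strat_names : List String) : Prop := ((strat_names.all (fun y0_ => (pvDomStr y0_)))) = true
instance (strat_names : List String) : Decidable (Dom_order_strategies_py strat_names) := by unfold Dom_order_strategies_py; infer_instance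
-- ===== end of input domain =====

-- B replaces A's per-group rescans plus the repeated 'not in ordered' list scan by a single
-- classifying pass over the names with per-group buckets and a seen set (objective: faster).

-- ===== PORT A =====
-- module constant STRATEGY_GROUPS; each value dict {"prefix": …, "palette": …} is ported as the pair (prefix, palette)
def STRATEGY_GROUPS : PySem.Dict String (String × List String) :=
  PySem.Dict.ofList [
    ("Steepeners", ("steep_", ["#1565c0", "#1976d2", "#1e88e5", "#2196f3",
                               "#42a5f5", "#64b5f6", "#90caf9", "#bbdefb"])),
    ("Flatteners", ("flat_", ["#e65100", "#f57c00", "#ff9800", "#ffb74d"])),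
    ("Butterflies", ("bfly_", ["#1b5e20", "#2e7d32", "#388e3c",
                               "#43a047", "#66bb6a", "#81c784"])),
    ("Directional", ("bh_", ["#b71c1c", "#c62828", "#d32f2f", "#e53935"])),
    ("Barbell", ("barbell_", ["#6a1b9a", "#7b1fa2", "#8e24aa"]))]

-- STRATEGY_GROUPS[grp]["prefix"] (the key is always one of the five group names, so getD is exact)
def pvPrefixOf (g : String) : String := (STRATEGY_GROUPS.getD g ("", [])).1

def order_strategies_py (strat_names : List String) : List String × List String :=
  let group_order : List String := ["Steepeners", "Flatteners", "Butterflies",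
                                    "Directional", "Barbell"]
  let init : List String × List String :=
    group_order.foldl (fun acc grp =>
      let members := strat_names.filter (fun s => PySem.Str.startswith s (pvPrefixOf grp))
      (acc.1 ++ members, acc.2 ++ List.replicate members.length grp)) ([], [])
  strat_names.foldl (fun acc s =>
    if acc.1.contains s then acc else (acc.1 ++ [s], acc.2 ++ ["Other"])) init

-- ===== PORT B =====
def pvGroupOrder : List String := ["Steepeners", "Flatteners", "Butterflies",
                                   "Directional", "Barbell"]

def order_strategies_py_alt (strat_names : List String) : List String × List String :=
  let buckets0 : PySem.Dict String (List String) :=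
    pvGroupOrder.foldl (fun d g => d.insert g []) PySem.Dict.empty
  -- one pass: the inner for/break is List.find? over the group order
  let st := strat_names.foldl
    (fun (st : PySem.Dict String (List String) × List String × PySem.Set String) s =>
      match pvGroupOrder.find? (fun g => PySem.Str.startswith s (pvPrefixOf g)) with
      | some g => (st.1.modify g [] (· ++ [s]), st.2.1, st.2.2)
      | none =>
        if PySem.Set.contains st.2.2 s then st
        else (st.1, st.2.1 ++ [s], PySem.Set.add st.2.2 s))
    (buckets0, ([], PySem.Set.empty))
  let fin := pvGroupOrder.foldl
    (fun (acc : List String × List String) g =>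
      let b := st.1.getD g []
      (acc.1 ++ b, acc.2 ++ List.replicate b.length g)) ([], [])
  (fin.1 ++ st.2.1, fin.2 ++ List.replicate st.2.1.length "Other")

-- ===== PRECONDITION & SPEC =====
def Spec_order_strategies_py (strat_names : List String) (out : List String × List String) : Prop := out = order_strategies_py_alt strat_names
instance (strat_names : List String) (out : List String × List String) : Decidable (Spec_order_strategies_py strat_names out) := by unfold Spec_order_strategies_py; infer_instance

-- ===== CLAIM (what is proved, stated in full; the proofs are below) =====
def Claim_equal_order_strategies_py : Prop := ∀ (strat_names : List String), Dom_order_strategies_py strat_names → Spec_order_strategies_py strat_names (order_strategies_py strat_names)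

-- ===== LEMMAS AND PROOFS =====

-- the "Other" sublist: non-prefixed names not seen before (seen accumulates)
def pvOth : List String → List String → List String
  | _, [] => []
  | seen, s :: xs =>
    if (pvGroupOrder.find? (fun g => PySem.Str.startswith s (pvPrefixOf g))).isSome
        || seen.contains s
    then pvOth seen xs
    else s :: pvOth (seen ++ [s]) xs

lemma pvOth_cons_skip (seen : List String) (s : String) (xs : List String)
    (h : ((pvGroupOrder.find? (fun g => PySem.Str.startswith s (pvPrefixOf g))).isSome
        || seen.contains s) = true) :
    pvOth seen (s :: xs) = pvOth seen xs := by
  rw [pvOth, if_pos h]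

lemma pvOth_cons_keep (seen : List String) (s : String) (xs : List String)
    (h : ((pvGroupOrder.find? (fun g => PySem.Str.startswith s (pvPrefixOf g))).isSome
        || seen.contains s) = false) :
    pvOth seen (s :: xs) = s :: pvOth (seen ++ [s]) xs := by
  rw [pvOth, if_neg (by rw [h]; simp)]

-- no group prefix is a prefix of another (concrete data, decidable)
lemma pv_pair_ok : ∀ g1 ∈ pvGroupOrder, ∀ g2 ∈ pvGroupOrder,
    g1 = g2 ∨ (¬ ((pvPrefixOf g1).toList <+: (pvPrefixOf g2).toList) ∧
               ¬ ((pvPrefixOf g2).toList <+: (pvPrefixOf g1).toList)) := by decide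

lemma pv_unique (s g1 g2 : String) (h1 : g1 ∈ pvGroupOrder) (h2 : g2 ∈ pvGroupOrder)
    (hs1 : PySem.Str.startswith s (pvPrefixOf g1) = true)
    (hs2 : PySem.Str.startswith s (pvPrefixOf g2) = true) : g1 = g2 := by
  rcases pv_pair_ok g1 h1 g2 h2 with h | ⟨ha, hb⟩
  · exact h
  · exfalso
    rw [PySem.Str.startswith_eq, PySem.Chars.startswith_iff] at hs1 hs2
    rcases List.prefix_or_prefix_of_prefix hs1 hs2 with h | h
    · exact ha h
    · exact hb h

lemma pv_match_iff (s g : String) (hg : g ∈ pvGroupOrder) :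
    PySem.Str.startswith s (pvPrefixOf g) = true ↔
      pvGroupOrder.find? (fun g' => PySem.Str.startswith s (pvPrefixOf g')) = some g := by
  constructor
  · intro hs
    cases hm : pvGroupOrder.find? (fun g' => PySem.Str.startswith s (pvPrefixOf g')) with
    | none => exact absurd hs (by simpa using List.find?_eq_none.mp hm g hg)
    | some g' =>
      have hp : PySem.Str.startswith s (pvPrefixOf g') = true :=
        List.find?_some (p := fun g' => PySem.Str.startswith s (pvPrefixOf g')) hm
      have hmem := List.mem_of_find?_eq_some hm
      rw [pv_unique s g' g hmem hg hp hs]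
  · intro hm
    exact List.find?_some (p := fun g' => PySem.Str.startswith s (pvPrefixOf g')) hm

lemma pv_filter_eq (xs : List String) (g : String) (hg : g ∈ pvGroupOrder) :
    xs.filter (fun s =>
        pvGroupOrder.find? (fun g' => PySem.Str.startswith s (pvPrefixOf g')) == some g)
    = xs.filter (fun s => PySem.Str.startswith s (pvPrefixOf g)) := by
  refine List.filter_congr fun s _ => ?_
  cases hp : PySem.Str.startswith s (pvPrefixOf g) with
  | true =>
    rw [(pv_match_iff s g hg).mp hp]
    exact beq_self_eq_true _
  | false =>
    cases hm : pvGroupOrder.find? (fun g' => PySem.Str.startswith s (pvPrefixOf g')) with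
    | none => rfl
    | some g' =>
      by_cases hgg : g' = g
      · have hps : PySem.Str.startswith s (pvPrefixOf g') = true :=
          List.find?_some (p := fun t => PySem.Str.startswith s (pvPrefixOf t)) hm
        rw [hgg, hp] at hps
        cases hps
      · simp [hgg]

lemma pv_A_loop (xs I L o : List String)
    (hI : ∀ s ∈ xs, (s ∈ I ↔
      (pvGroupOrder.find? (fun g => PySem.Str.startswith s (pvPrefixOf g))).isSome = true)) :
    xs.foldl (fun acc s =>
        if acc.1.contains s then acc else (acc.1 ++ [s], acc.2 ++ ["Other"]))
      (I ++ o, L ++ List.replicate o.length "Other")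
    = (I ++ (o ++ pvOth o xs), L ++ List.replicate (o ++ pvOth o xs).length "Other") := by
  induction xs generalizing o with
  | nil => simp [pvOth]
  | cons s xs ih =>
    rw [List.foldl_cons]
    by_cases hc : s ∈ I ++ o
    · have hcontains : (I ++ o).contains s = true := List.elem_eq_true_of_mem hc
      rw [if_pos hcontains]
      have hcond : ((pvGroupOrder.find? (fun g => PySem.Str.startswith s (pvPrefixOf g))).isSome
          || o.contains s) = true := by
        rcases List.mem_append.mp hc with h | h
        · rw [(hI s (by simp)).mp h]
          rfl
        · have ho : o.contains s = true := List.elem_eq_true_of_mem h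
          rw [ho]
          simp
      rw [pvOth_cons_skip o s xs hcond]
      exact ih o (fun t ht => hI t (by simp [ht]))
    · have hs_not_I : s ∉ I := fun h => hc (List.mem_append.mpr (Or.inl h))
      have hs_not_o : s ∉ o := fun h => hc (List.mem_append.mpr (Or.inr h))
      have hcontains : (I ++ o).contains s = false := by simpa using hc
      rw [if_neg (by rw [hcontains]; simp)]
      have hsome : (pvGroupOrder.find? (fun g => PySem.Str.startswith s (pvPrefixOf g))).isSome
          = false := by
        rcases Bool.eq_false_or_eq_true
          ((pvGroupOrder.find? (fun g => PySem.Str.startswith s (pvPrefixOf g))).isSome) with h | h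
        · exact absurd ((hI s (by simp)).mpr h) hs_not_I
        · exact h
      have ho : o.contains s = false := by simpa using hs_not_o
      have hcond : ((pvGroupOrder.find? (fun g => PySem.Str.startswith s (pvPrefixOf g))).isSome
          || o.contains s) = false := by rw [hsome, ho]; rfl
      rw [pvOth_cons_keep o s xs hcond]
      have h1 : (I ++ o) ++ [s] = I ++ (o ++ [s]) := by simp
      have h2 : (L ++ List.replicate o.length "Other") ++ ["Other"]
          = L ++ List.replicate (o ++ [s]).length "Other" := by
        simp [List.replicate_succ']
      rw [h1, h2, ih (o ++ [s]) (fun t ht => hI t (by simp [ht]))]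
      simp

lemma pv_A_loop0 (xs I L : List String)
    (hI : ∀ s ∈ xs, (s ∈ I ↔
      (pvGroupOrder.find? (fun g => PySem.Str.startswith s (pvPrefixOf g))).isSome = true)) :
    xs.foldl (fun acc s =>
        if acc.1.contains s then acc else (acc.1 ++ [s], acc.2 ++ ["Other"]))
      (I, L)
    = (I ++ pvOth [] xs, L ++ List.replicate (pvOth [] xs).length "Other") := by
  have h := pv_A_loop xs I L [] hI
  simpa using h

lemma pv_B_loop (xs : List String) (d : PySem.Dict String (List String))
    (o : List String) (seen : PySem.Set String)
    (hseen : ∀ t, t ∈ seen ↔ t ∈ o) :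
    (∀ g, (xs.foldl
      (fun (st : PySem.Dict String (List String) × List String × PySem.Set String) s =>
        match pvGroupOrder.find? (fun g => PySem.Str.startswith s (pvPrefixOf g)) with
        | some g => (st.1.modify g [] (· ++ [s]), st.2.1, st.2.2)
        | none =>
          if PySem.Set.contains st.2.2 s then st
          else (st.1, st.2.1 ++ [s], PySem.Set.add st.2.2 s))
      (d, (o, seen))).1.getD g []
      = d.getD g [] ++ xs.filter (fun s =>
          pvGroupOrder.find? (fun g' => PySem.Str.startswith s (pvPrefixOf g')) == some g))
    ∧ (xs.foldl
      (fun (st : PySem.Dict String (List String) × List String × PySem.Set String) s =>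
        match pvGroupOrder.find? (fun g => PySem.Str.startswith s (pvPrefixOf g)) with
        | some g => (st.1.modify g [] (· ++ [s]), st.2.1, st.2.2)
        | none =>
          if PySem.Set.contains st.2.2 s then st
          else (st.1, st.2.1 ++ [s], PySem.Set.add st.2.2 s))
      (d, (o, seen))).2.1 = o ++ pvOth o xs := by
  induction xs generalizing d o seen with
  | nil => simp [pvOth]
  | cons s xs ih =>
    rw [List.foldl_cons]
    cases hm : pvGroupOrder.find? (fun g => PySem.Str.startswith s (pvPrefixOf g)) with
    | some g0 =>
      -- match reduced by the case split
      obtain ⟨ih1, ih2⟩ := ih (d.modify g0 [] (· ++ [s])) o seen hseen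
      constructor
      · intro g
        rw [ih1 g, PySem.Dict.getD_modify]
        by_cases hg : g = g0
        · subst hg
          have hps : (pvGroupOrder.find?
              (fun g' => PySem.Str.startswith s (pvPrefixOf g')) == some g) = true := by
            rw [hm]; exact beq_self_eq_true _
          rw [List.filter_cons_of_pos (p := fun s => pvGroupOrder.find?
              (fun g' => PySem.Str.startswith s (pvPrefixOf g')) == some g) (a := s) (l := xs) hps,
            if_pos rfl]
          simp
        · have hps : (pvGroupOrder.find?
              (fun g' => PySem.Str.startswith s (pvPrefixOf g')) == some g) = false := by
            rw [hm]; simp [Ne.symm hg]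
          rw [List.filter_cons_of_neg (p := fun s => pvGroupOrder.find?
              (fun g' => PySem.Str.startswith s (pvPrefixOf g')) == some g) (a := s) (l := xs)
              (by simp only [hps]; exact Bool.false_ne_true), if_neg hg]
      · rw [ih2, pvOth_cons_skip o s xs (by rw [hm]; rfl)]
    | none =>
      -- match reduced by the case split
      have hps : ∀ g, (pvGroupOrder.find?
          (fun g' => PySem.Str.startswith s (pvPrefixOf g')) == some g) = false := by
        intro g; rw [hm]; rfl
      by_cases hc : s ∈ seen
      · have hcb : PySem.Set.contains seen s = true := (PySem.Set.contains_iff seen s).mpr hc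
        simp only [hcb, if_true]
        obtain ⟨ih1, ih2⟩ := ih d o seen hseen
        refine ⟨fun g => ?_, ?_⟩
        · rw [ih1 g, List.filter_cons_of_neg (p := fun s => pvGroupOrder.find?
              (fun g' => PySem.Str.startswith s (pvPrefixOf g')) == some g) (a := s) (l := xs)
              (by simp only [hps g]; exact Bool.false_ne_true)]
        · have ho : o.contains s = true := List.elem_eq_true_of_mem ((hseen s).mp hc)
          rw [ih2, pvOth_cons_skip o s xs (by rw [hm, ho]; rfl)]
      · have hcb : PySem.Set.contains seen s = false := by
          simpa using (fun h => hc ((PySem.Set.contains_iff seen s).mp h))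
        simp only [hcb, Bool.false_eq_true, if_false]
        have hseen' : ∀ t, t ∈ PySem.Set.add seen s ↔ t ∈ o ++ [s] := by
          intro t
          rw [PySem.Set.mem_add seen s t]
          simp [hseen t, or_comm]
        obtain ⟨ih1, ih2⟩ := ih d (o ++ [s]) (PySem.Set.add seen s) hseen'
        refine ⟨fun g => ?_, ?_⟩
        · rw [ih1 g, List.filter_cons_of_neg (p := fun s => pvGroupOrder.find?
              (fun g' => PySem.Str.startswith s (pvPrefixOf g')) == some g) (a := s) (l := xs)
              (by simp only [hps g]; exact Bool.false_ne_true)]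
        · have ho : o.contains s = false := by
            simpa using (fun h => hc ((hseen s).mpr h))
          rw [ih2, pvOth_cons_keep o s xs (by rw [hm, ho]; rfl)]
          simp

lemma pv_fin_eval (r : PySem.Dict String (List String)) :
    pvGroupOrder.foldl
      (fun (acc : List String × List String) g =>
        let b := r.getD g []
        (acc.1 ++ b, acc.2 ++ List.replicate b.length g)) ([], [])
    = (((((([] : List String) ++ r.getD "Steepeners" []) ++ r.getD "Flatteners" [])
          ++ r.getD "Butterflies" []) ++ r.getD "Directional" []) ++ r.getD "Barbell" [],
       ((((([] : List String) ++ List.replicate (r.getD "Steepeners" []).length "Steepeners")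
          ++ List.replicate (r.getD "Flatteners" []).length "Flatteners")
          ++ List.replicate (r.getD "Butterflies" []).length "Butterflies")
          ++ List.replicate (r.getD "Directional" []).length "Directional")
          ++ List.replicate (r.getD "Barbell" []).length "Barbell") := rfl

lemma pv_init_eval (xs : List String) :
    (["Steepeners", "Flatteners", "Butterflies", "Directional", "Barbell"] : List String).foldl
      (fun (acc : List String × List String) grp =>
        let members := xs.filter (fun s => PySem.Str.startswith s (pvPrefixOf grp))
        (acc.1 ++ members, acc.2 ++ List.replicate members.length grp)) ([], [])
    = (((((([] : List String) ++ xs.filter (fun s => PySem.Str.startswith s (pvPrefixOf "Steepeners")))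
          ++ xs.filter (fun s => PySem.Str.startswith s (pvPrefixOf "Flatteners")))
          ++ xs.filter (fun s => PySem.Str.startswith s (pvPrefixOf "Butterflies")))
          ++ xs.filter (fun s => PySem.Str.startswith s (pvPrefixOf "Directional")))
          ++ xs.filter (fun s => PySem.Str.startswith s (pvPrefixOf "Barbell")),
       ((((([] : List String)
          ++ List.replicate (xs.filter (fun s => PySem.Str.startswith s (pvPrefixOf "Steepeners"))).length "Steepeners")
          ++ List.replicate (xs.filter (fun s => PySem.Str.startswith s (pvPrefixOf "Flatteners"))).length "Flatteners")
          ++ List.replicate (xs.filter (fun s => PySem.Str.startswith s (pvPrefixOf "Butterflies"))).length "Butterflies")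
          ++ List.replicate (xs.filter (fun s => PySem.Str.startswith s (pvPrefixOf "Directional"))).length "Directional")
          ++ List.replicate (xs.filter (fun s => PySem.Str.startswith s (pvPrefixOf "Barbell"))).length "Barbell") := rfl

theorem order_strategies_py_spec : Claim_equal_order_strategies_py := by
  unfold Claim_equal_order_strategies_py Spec_order_strategies_py
  intro xs _
  simp only [order_strategies_py, order_strategies_py_alt]
  rw [pv_fin_eval, pv_init_eval]
  obtain ⟨hb1, hb2⟩ := pv_B_loop xs
    (pvGroupOrder.foldl (fun d g => d.insert g []) PySem.Dict.empty) [] PySem.Set.empty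
    (by intro t; simp [PySem.Set.empty])
  rw [hb1 "Steepeners", hb1 "Flatteners", hb1 "Butterflies", hb1 "Directional", hb1 "Barbell", hb2]
  have hg1 : ("Steepeners" : String) ∈ pvGroupOrder := by decide
  have hg2 : ("Flatteners" : String) ∈ pvGroupOrder := by decide
  have hg3 : ("Butterflies" : String) ∈ pvGroupOrder := by decide
  have hg4 : ("Directional" : String) ∈ pvGroupOrder := by decide
  have hg5 : ("Barbell" : String) ∈ pvGroupOrder := by decide
  rw [pv_filter_eq xs _ hg1, pv_filter_eq xs _ hg2, pv_filter_eq xs _ hg3,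
      pv_filter_eq xs _ hg4, pv_filter_eq xs _ hg5]
  have hb0 : (pvGroupOrder.foldl (fun d g => d.insert g [])
      (PySem.Dict.empty : PySem.Dict String (List String))).getD "Steepeners" [] = []
      ∧ (pvGroupOrder.foldl (fun d g => d.insert g [])
      (PySem.Dict.empty : PySem.Dict String (List String))).getD "Flatteners" [] = []
      ∧ (pvGroupOrder.foldl (fun d g => d.insert g [])
      (PySem.Dict.empty : PySem.Dict String (List String))).getD "Butterflies" [] = []
      ∧ (pvGroupOrder.foldl (fun d g => d.insert g [])
      (PySem.Dict.empty : PySem.Dict String (List String))).getD "Directional" [] = []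
      ∧ (pvGroupOrder.foldl (fun d g => d.insert g [])
      (PySem.Dict.empty : PySem.Dict String (List String))).getD "Barbell" [] = [] := by decide
  rw [hb0.1, hb0.2.1, hb0.2.2.1, hb0.2.2.2.1, hb0.2.2.2.2]
  have hI : ∀ s ∈ xs,
      (s ∈ ((((([] : List String)
            ++ xs.filter (fun s => PySem.Str.startswith s (pvPrefixOf "Steepeners")))
            ++ xs.filter (fun s => PySem.Str.startswith s (pvPrefixOf "Flatteners")))
            ++ xs.filter (fun s => PySem.Str.startswith s (pvPrefixOf "Butterflies")))
            ++ xs.filter (fun s => PySem.Str.startswith s (pvPrefixOf "Directional")))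
            ++ xs.filter (fun s => PySem.Str.startswith s (pvPrefixOf "Barbell")) ↔
        (pvGroupOrder.find? (fun g => PySem.Str.startswith s (pvPrefixOf g))).isSome = true) := by
    intro s hs
    rw [List.find?_isSome]
    simp only [List.mem_append, List.mem_filter, List.not_mem_nil, false_or, pvGroupOrder,
      List.mem_cons, List.not_mem_nil, or_false]
    constructor
    · rintro ((((⟨_, h⟩ | ⟨_, h⟩) | ⟨_, h⟩) | ⟨_, h⟩) | ⟨_, h⟩)
      · exact ⟨"Steepeners", by simp, h⟩
      · exact ⟨"Flatteners", by simp, h⟩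
      · exact ⟨"Butterflies", by simp, h⟩
      · exact ⟨"Directional", by simp, h⟩
      · exact ⟨"Barbell", by simp, h⟩
    · rintro ⟨g, hg, h⟩
      rcases hg with rfl | rfl | rfl | rfl | rfl
      · exact Or.inl (Or.inl (Or.inl (Or.inl ⟨hs, h⟩)))
      · exact Or.inl (Or.inl (Or.inl (Or.inr ⟨hs, h⟩)))
      · exact Or.inl (Or.inl (Or.inr ⟨hs, h⟩))
      · exact Or.inl (Or.inr ⟨hs, h⟩)
      · exact Or.inr ⟨hs, h⟩
  rw [pv_A_loop0 xs _ _ hI]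
  simp

-- ===== VERDICT (by name: the statement is the Claim_ definition above) =====
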